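-- pv_equiv track=rewrite | github.com/wtf/testng | bundles.py | _remove_children
-- ===== SOURCE A (Python) =====
-- def _remove_children(paths):
--     # Sort by length so we only have to check subdirectories in one direction
--     paths = sorted(paths, key=len)
--     # Find all subdirectories
--     subdirs = set()
--     for (i, path) in enumerate(paths):
--         for s in paths[i+1:]:
--             if s.startswith(path):
--                 subdirs.add(s)
--     # Remove subdirectories
--     paths = set(paths)
--     paths.difference_update(subdirs)
--     return paths
-- ===== SOURCE B (Python) =====
-- def _remove_children(paths):
--     """Drop every path that extends another entry of the list.
--
--     A path is a child when some other entry (for a repeated path, its other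
--     copy) is a prefix of it.  Paths are visited shortest first, so every
--     possible parent of a path has already been recorded in `seen` when the
--     path is reached, and each prefix test is a single dict lookup.
--     """
--     seen = {}
--     for p in sorted(paths, key=len):
--         keep = not any(p[:k] in seen for k in range(len(p)))
--         if p in seen:
--             seen[p] = False  # repeated entry: each copy extends the other
--         else:
--             seen[p] = keep
--     return {p for p, kept in seen.items() if kept}
-- ===== Notes on version B (the rewrite author's own statement) =====
-- stated objective: faster
-- what changed: A sorts by length and runs a quadratic pairwise startswith scan to collect children before a set difference; B makes one shortest-first pass that records a keep/drop verdict per distinct entry in a dict and answers each proper-prefix test with a dict lookup, so the inner scan over all longer paths disappears.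
import Mathlib
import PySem

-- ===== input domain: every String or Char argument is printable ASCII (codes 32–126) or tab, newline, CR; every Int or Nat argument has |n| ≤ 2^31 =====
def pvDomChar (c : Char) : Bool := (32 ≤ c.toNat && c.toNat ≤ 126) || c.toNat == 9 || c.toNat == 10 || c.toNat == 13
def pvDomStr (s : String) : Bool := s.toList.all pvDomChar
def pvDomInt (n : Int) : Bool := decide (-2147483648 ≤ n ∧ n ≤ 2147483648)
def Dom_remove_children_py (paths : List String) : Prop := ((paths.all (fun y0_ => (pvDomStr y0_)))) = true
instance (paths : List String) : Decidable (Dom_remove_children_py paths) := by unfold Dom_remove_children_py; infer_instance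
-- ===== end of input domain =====

-- B makes one shortest-first pass recording a keep/drop verdict per distinct entry
-- in a dict, so per-prefix dict lookups replace A's pairwise startswith scan; the
-- returned set is proved identical on every input.

-- ===== PORT A =====
def remove_children_py (paths : List String) : List String :=
  let sortedPaths := PySem.List.sorted paths (fun s => PySem.Str.len s)
  let subdirs :=
    (PySem.List.enumerate sortedPaths 0).foldl
      (fun sd ip =>
        (PySem.List.slice sortedPaths (some (ip.1 + 1)) none).foldl
          (fun sd s => if PySem.Str.startswith s ip.2 then PySem.Set.add sd s else sd) sd)
      PySem.Set.empty
  PySem.Set.diff (PySem.Set.ofList sortedPaths) subdirs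

-- ===== PORT B =====
def remove_children_py_alt (paths : List String) : List String :=
  let seen :=
    (PySem.List.sorted paths (fun s => PySem.Str.len s)).foldl
      (fun seen p =>
        let keep := !((PySem.List.pyRange 0 (PySem.Str.len p) 1).any
            (fun k => PySem.Dict.contains seen (PySem.Str.slice p none (some k))))
        if PySem.Dict.contains seen p then PySem.Dict.insert seen p false
        else PySem.Dict.insert seen p keep)
      (PySem.Dict.empty : PySem.Dict String Bool)
  PySem.Set.ofList (((PySem.Dict.items seen).filter (fun pk => pk.2)).map (fun pk => pk.1))

-- ===== PRECONDITION & SPEC =====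
def Spec_remove_children_py (paths : List String) (out : List String) : Prop := out = remove_children_py_alt paths
instance (paths : List String) (out : List String) : Decidable (Spec_remove_children_py paths out) := by unfold Spec_remove_children_py; infer_instance

-- ===== CLAIM (what is proved, stated in full; the proofs are below) =====
def Claim_equal_remove_children_py : Prop := ∀ (paths : List String), Dom_remove_children_py paths → Spec_remove_children_py paths (remove_children_py paths)

-- ===== LEMMAS AND PROOFS =====

-- "x has no proper prefix among paths", as a Bool
def pvNoPre (paths : List String) (x : String) : Bool :=
  !(paths.any (fun q => q != x && decide (q.toList <+: x.toList)))

theorem pvNoPre_iff (paths : List String) (x : String) :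
    pvNoPre paths x = true ↔ ¬ ∃ q ∈ paths, q ≠ x ∧ q.toList <+: x.toList := by
  simp [pvNoPre]

-- the verdict B's dict stores for x after the entries pre have been processed
def pvVerd (paths pre : List String) (x : String) : Bool :=
  decide (pre.count x = 1) && pvNoPre paths x

-- membership in PySem.List.enumerate
theorem pv_mem_enumerate {α : Type} (l : List α) (s : Int) (p : Int × α) :
    p ∈ PySem.List.enumerate l s ↔ ∃ k : Nat, p.1 = s + k ∧ l[k]? = some p.2 := by
  induction l generalizing s with
  | nil => simp [PySem.List.enumerate_nil]
  | cons a t ih =>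
    rw [PySem.List.enumerate_cons]
    simp only [List.mem_cons, ih]
    constructor
    · rintro (rfl | ⟨k, hk, hget⟩)
      · exact ⟨0, by simp, by simp⟩
      · exact ⟨k + 1, by push_cast at hk ⊢; omega, by simpa using hget⟩
    · rintro ⟨k, hk, hget⟩
      cases k with
      | zero =>
        left
        simp only [Nat.cast_zero, add_zero] at hk
        simp only [List.getElem?_cons_zero, Option.some_inj] at hget
        cases p; simp_all
      | succ k =>
        right
        exact ⟨k, by push_cast at hk ⊢; omega, by simpa using hget⟩

-- membership in a fold accumulating Set.update steps
theorem pv_mem_foldl_update {α β : Type} [BEq α] [LawfulBEq α]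
    (xs : List β) (g : β → List α) (sd : PySem.Set α) (x : α) :
    x ∈ xs.foldl (fun sd b => List.foldl PySem.Set.add sd (g b)) sd ↔ x ∈ sd ∨ ∃ b ∈ xs, x ∈ g b := by
  induction xs generalizing sd with
  | nil => simp
  | cons b t ih =>
    have hupd : ∀ (y : α), y ∈ List.foldl PySem.Set.add sd (g b) ↔ y ∈ sd ∨ y ∈ g b := by
      intro y
      have hu : List.foldl PySem.Set.add sd (g b) = PySem.Set.update sd (g b) := rfl
      rw [hu, PySem.Set.update_eq_append_filter]
      simp only [List.mem_append, List.mem_filter, PySem.Set.mem_ofList]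
      by_cases hy : y ∈ sd <;> simp [hy]
    rw [List.foldl_cons, ih]
    simp only [hupd, List.exists_mem_cons_iff]
    tauto

-- a value counted at least twice occurs again after some occurrence
theorem pv_two_idx {α : Type} [BEq α] [LawfulBEq α] (l : List α) (x : α) (h : 2 ≤ l.count x) :
    ∃ k : Nat, l[k]? = some x ∧ x ∈ l.drop (k + 1) := by
  induction l with
  | nil => simp at h
  | cons a t ih =>
    by_cases hax : a = x
    · subst hax
      have h1 : 1 ≤ t.count a := by
        rw [List.count_cons_self] at h; omega
      exact ⟨0, by simp, by simpa using List.count_pos_iff.mp (by omega)⟩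
    · have h2 : 2 ≤ t.count x := by
        rw [List.count_cons] at h
        simp only [beq_iff_eq, hax, if_false] at h
        omega
      obtain ⟨k, h1, hm⟩ := ih h2
      exact ⟨k + 1, by simpa using h1, by simpa using hm⟩

-- a proper string prefix is strictly shorter
theorem pv_proper_prefix_lt (q x : String) (hne : q ≠ x) (hpre : q.toList <+: x.toList) :
    q.toList.length < x.toList.length := by
  rcases Nat.lt_or_ge q.toList.length x.toList.length with hlt | hge
  · exact hlt
  · exact absurd (String.ext (List.IsPrefix.eq_of_length hpre
      (Nat.le_antisymm (List.IsPrefix.length_le hpre) hge))) hne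

-- slicing x to the length of one of its prefixes recovers the prefix
theorem pv_slice_of_prefix (x q : String) (hpre : q.toList <+: x.toList) :
    PySem.Str.slice x none (some (q.toList.length : Int)) = q := by
  apply String.ext
  rw [PySem.Str.toList_slice, PySem.Chars.slice_eq_listSlice,
    PySem.List.slice_to _ (by positivity)]
  simp only [Int.toNat_natCast]
  exact (List.prefix_iff_eq_take.mp hpre).symm

-- characterisation of A's subdirs set, for x in the length-sorted list
theorem pv_subdirs_iff (x : String)
    (sortedPaths : List String)
    (hmono : ∀ (p q : Nat) (a b : String), p ≤ q →
      sortedPaths[p]? = some a → sortedPaths[q]? = some b →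
      a.toList.length ≤ b.toList.length)
    (hx : x ∈ sortedPaths) :
    (x ∈ (PySem.List.enumerate sortedPaths 0).foldl
      (fun sd ip =>
        (PySem.List.slice sortedPaths (some (ip.1 + 1)) none).foldl
          (fun sd s => if PySem.Str.startswith s ip.2 then PySem.Set.add sd s else sd) sd)
      PySem.Set.empty)
    ↔ (2 ≤ sortedPaths.count x ∨ ∃ q ∈ sortedPaths, q ≠ x ∧ q.toList <+: x.toList) := by
  have hidx : (x ∈ (PySem.List.enumerate sortedPaths 0).foldl
      (fun sd ip =>
        (PySem.List.slice sortedPaths (some (ip.1 + 1)) none).foldl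
          (fun sd s => if PySem.Str.startswith s ip.2 then PySem.Set.add sd s else sd) sd)
      PySem.Set.empty)
      ↔ ∃ k : Nat, ∃ q : String, sortedPaths[k]? = some q ∧
          x ∈ sortedPaths.drop (k + 1) ∧ PySem.Str.startswith x q = true := by
    simp only [PySem.List.foldl_if_eq_foldl_filter]
    rw [pv_mem_foldl_update]
    simp only [PySem.Set.empty, List.not_mem_nil, false_or]
    constructor
    · rintro ⟨ip, hip, hmem⟩
      obtain ⟨k, hk1, hk2⟩ := (pv_mem_enumerate _ _ _).mp hip
      refine ⟨k, ip.2, hk2, ?_, ?_⟩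
      · have h1 : PySem.List.slice sortedPaths (some (ip.1 + 1)) none = sortedPaths.drop (k + 1) := by
          rw [hk1]
          rw [PySem.List.slice_from sortedPaths (by omega : (0:Int) ≤ 0 + (k:Int) + 1)]
          congr 1
          omega
        rw [h1] at hmem
        exact (List.mem_filter.mp hmem).1
      · exact (List.mem_filter.mp hmem).2
    · rintro ⟨k, q, hget, hdrop, hsw⟩
      refine ⟨((0 : Int) + (k : Nat), q), (pv_mem_enumerate _ _ _).mpr ⟨k, rfl, hget⟩, ?_⟩
      have h1 : PySem.List.slice sortedPaths (some ((0:Int) + (k:Nat) + 1)) none = sortedPaths.drop (k + 1) := by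
        rw [PySem.List.slice_from sortedPaths (by omega : (0:Int) ≤ 0 + (k:Int) + 1)]
        congr 1
        omega
      rw [h1]
      exact List.mem_filter.mpr ⟨hdrop, hsw⟩
  rw [hidx]
  constructor
  · rintro ⟨k, q, hget, hdrop, hsw⟩
    have hpre : q.toList <+: x.toList := by
      rw [PySem.Str.startswith_eq] at hsw
      exact (PySem.Chars.startswith_iff _ _).mp hsw
    by_cases hqx : q = x
    · subst hqx
      left
      have hk : k < sortedPaths.length := (List.getElem?_eq_some_iff.mp hget).1
      have hsplit : sortedPaths = sortedPaths.take (k+1) ++ sortedPaths.drop (k+1) :=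
        (List.take_append_drop _ _).symm
      have h1 : 1 ≤ (sortedPaths.take (k+1)).count q := by
        apply List.count_pos_iff.mpr
        apply List.mem_of_getElem? (i := k)
        rw [List.getElem?_take_of_lt (by omega)]
        exact hget
      have h2 : 1 ≤ (sortedPaths.drop (k+1)).count q := List.count_pos_iff.mpr hdrop
      conv_rhs => rw [hsplit]
      rw [List.count_append]
      omega
    · exact Or.inr ⟨q, List.mem_of_getElem? hget, hqx, hpre⟩
  · rintro (hdup | ⟨q, hqmem, hne, hpre⟩)
    · obtain ⟨k, hget, hdrop⟩ := pv_two_idx sortedPaths x hdup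
      exact ⟨k, x, hget, hdrop, by
        rw [PySem.Str.startswith_eq]
        exact (PySem.Chars.startswith_iff _ _).mpr (List.prefix_refl _)⟩
    · obtain ⟨j, hj⟩ := List.mem_iff_getElem?.mp hx
      obtain ⟨k, hk⟩ := List.mem_iff_getElem?.mp hqmem
      have hlen : q.toList.length < x.toList.length := pv_proper_prefix_lt q x hne hpre
      have hkj : k < j := by
        by_contra hlt
        have := hmono j k x q (Nat.le_of_not_lt hlt) hj hk
        omega
      refine ⟨k, q, hk, ?_, ?_⟩
      · apply List.mem_of_getElem? (i := j - (k+1))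
        rw [List.getElem?_drop]
        have harith : k + 1 + (j - (k+1)) = j := by omega
        rw [harith]
        exact hj
      · rw [PySem.Str.startswith_eq]
        exact (PySem.Chars.startswith_iff _ _).mpr hpre

-- B's per-step prefix test against the already-seen entries decides "no proper prefix in paths"
theorem pv_check_eq (paths pre rest : List String) (p : String) (d : PySem.Dict String Bool)
    (hkeys : PySem.Dict.keys d = PySem.Set.ofList pre)
    (hperm : (pre ++ p :: rest).Perm paths)
    (hpw : (pre ++ p :: rest).Pairwise (fun a b => a.toList.length ≤ b.toList.length)) :
    (!((PySem.List.pyRange 0 (PySem.Str.len p) 1).any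
        (fun k => PySem.Dict.contains d (PySem.Str.slice p none (some k))))) = pvNoPre paths p := by
  unfold pvNoPre
  congr 1
  rw [Bool.eq_iff_iff]
  simp only [List.any_eq_true, bne_iff_ne, Bool.and_eq_true, decide_eq_true_eq, ne_eq]
  constructor
  · rintro ⟨k, hk, hc⟩
    rw [PySem.List.mem_pyRange_one] at hk
    obtain ⟨hk0, hklt⟩ := hk
    rw [PySem.Str.len_eq] at hklt
    have hqpre : PySem.Str.slice p none (some k) ∈ pre := by
      have := (PySem.Dict.contains_iff_mem_keys _ _).mp hc
      rw [hkeys] at this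
      exact (PySem.Set.mem_ofList _ _).mp this
    have hq : PySem.Str.slice p none (some k) ∈ paths :=
      hperm.mem_iff.mp (List.mem_append.mpr (Or.inl hqpre))
    have hlenq : (PySem.Str.slice p none (some k)).toList.length = k.toNat := by
      rw [PySem.Str.toList_slice, PySem.Chars.slice_eq_listSlice, PySem.List.slice_to _ hk0,
        List.length_take]
      omega
    refine ⟨PySem.Str.slice p none (some k), hq, ?_, ?_⟩
    · intro he
      rw [he] at hlenq
      omega
    · rw [PySem.Str.toList_slice, PySem.Chars.slice_eq_listSlice, PySem.List.slice_to _ hk0]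
      exact List.take_prefix _ _
  · rintro ⟨q, hq, hne, hpre⟩
    have hlt : q.toList.length < p.toList.length := pv_proper_prefix_lt q p hne hpre
    -- q is strictly shorter than p, so it was already processed: q ∈ pre
    have hqpre : q ∈ pre := by
      have hqL : q ∈ pre ++ p :: rest := hperm.mem_iff.mpr hq
      rcases List.mem_append.mp hqL with h | h
      · exact h
      · exfalso
        rcases List.mem_cons.mp h with h' | h'
        · rw [h'] at hlt; omega
        · have hle := (List.pairwise_cons.mp (List.pairwise_append.mp hpw).2.1).1 q h'
          omega
    refine ⟨(q.toList.length : Int), ?_, ?_⟩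
    · rw [PySem.List.mem_pyRange_one, PySem.Str.len_eq]
      exact ⟨by positivity, by exact_mod_cast hlt⟩
    · rw [pv_slice_of_prefix p q hpre]
      apply (PySem.Dict.contains_iff_mem_keys _ _).mpr
      rw [hkeys]
      exact (PySem.Set.mem_ofList _ _).mpr hqpre

-- the invariant of B's loop: seen maps each distinct processed entry to its verdict
theorem pv_seen_fold (paths : List String) : ∀ (rest pre : List String) (d : PySem.Dict String Bool),
    (pre ++ rest).Perm paths →
    (pre ++ rest).Pairwise (fun a b => a.toList.length ≤ b.toList.length) →
    PySem.Dict.items d = (PySem.Set.ofList pre).map (fun x => (x, pvVerd paths pre x)) →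
    PySem.Dict.items
      (rest.foldl
        (fun seen p =>
          let keep := !((PySem.List.pyRange 0 (PySem.Str.len p) 1).any
              (fun k => PySem.Dict.contains seen (PySem.Str.slice p none (some k))))
          if PySem.Dict.contains seen p then PySem.Dict.insert seen p false
          else PySem.Dict.insert seen p keep)
        d)
    = (PySem.Set.ofList (pre ++ rest)).map (fun x => (x, pvVerd paths (pre ++ rest) x)) := by
  intro rest
  induction rest with
  | nil => intro pre d _ _ hitems; simpa using hitems
  | cons p rest' ih =>
    intro pre d hperm hpw hitems
    have hkeys : PySem.Dict.keys d = PySem.Set.ofList pre := by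
      have : PySem.Dict.keys d = (PySem.Dict.items d).map (fun pk => pk.1) := rfl
      rw [this, hitems, List.map_map]
      have h2 : ((fun pk : String × Bool => pk.1) ∘ fun x => (x, pvVerd paths pre x)) = id := rfl
      rw [h2, List.map_id]
    have hofl : ∀ (x : String), PySem.Set.ofList (pre ++ [x]) = PySem.Set.add (PySem.Set.ofList pre) x := by
      intro x
      rw [PySem.Set.ofList_eq_foldl, PySem.Set.ofList_eq_foldl, List.foldl_append]
      rfl
    have hassoc : pre ++ p :: rest' = (pre ++ [p]) ++ rest' := by simp
    have hcont : PySem.Dict.contains d p = decide (p ∈ pre) := by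
      rw [PySem.Dict.contains_eq_decide_mem_keys, hkeys]
      simp only [decide_eq_decide]
      exact PySem.Set.mem_ofList pre p
    rw [List.foldl_cons]
    have hstep : PySem.Dict.items
        (if PySem.Dict.contains d p then PySem.Dict.insert d p false
         else PySem.Dict.insert d p
           (!((PySem.List.pyRange 0 (PySem.Str.len p) 1).any
              (fun k => PySem.Dict.contains d (PySem.Str.slice p none (some k))))))
        = (PySem.Set.ofList (pre ++ [p])).map (fun x => (x, pvVerd paths (pre ++ [p]) x)) := by
      by_cases hp : p ∈ pre
      · rw [if_pos (by rw [hcont]; simpa using hp)]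
        rw [PySem.Dict.items_insert_of_contains _ _ (by rw [hcont]; simpa using hp), hitems,
          List.map_map]
        have hofl2 : PySem.Set.ofList (pre ++ [p]) = PySem.Set.ofList pre := by
          rw [hofl]
          simp [PySem.Set.add, PySem.Set.contains, List.contains_eq_mem, hp]
        rw [hofl2]
        apply List.map_congr_left
        intro x hx
        by_cases hxp : x = p
        · subst hxp
          simp only [Function.comp_apply, beq_self_eq_true, if_pos]
          have hc1 : (pre ++ [x]).count x ≠ 1 := by
            have h0 : 0 < pre.count x := List.count_pos_iff.mpr hp
            have h1 : (pre ++ [x]).count x = pre.count x + 1 := by simp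
            omega
          have hv : pvVerd paths (pre ++ [x]) x = false := by
            unfold pvVerd
            rw [decide_eq_false hc1]
            rfl
          rw [hv]
        · have hbeq : (x == p) = false := by simp [hxp]
          simp only [Function.comp_apply, hbeq, Bool.false_eq_true, if_false]
          have hcx : (pre ++ [p]).count x = pre.count x := by
            rw [List.count_append, List.count_singleton]
            simp [Ne.symm hxp]
          simp [pvVerd, hcx]
      · rw [if_neg (by rw [hcont]; simpa using hp)]
        rw [PySem.Dict.items_insert_of_not_contains _ _ (by rw [hcont]; simpa using hp), hitems]
        have hofl2 : PySem.Set.ofList (pre ++ [p]) = PySem.Set.ofList pre ++ [p] := by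
          rw [hofl]
          have : p ∉ PySem.Set.ofList pre := fun h => hp ((PySem.Set.mem_ofList _ _).mp h)
          simp [PySem.Set.add, PySem.Set.contains, List.contains_eq_mem, this]
        rw [hofl2, List.map_append]
        congr 1
        · apply List.map_congr_left
          intro x hx
          have hxp : x ≠ p := by
            intro he
            exact hp (by rw [← he]; exact (PySem.Set.mem_ofList _ _).mp hx)
          have hcx : (pre ++ [p]).count x = pre.count x := by
            rw [List.count_append, List.count_singleton]
            simp [Ne.symm hxp]
          simp [pvVerd, hcx]
        · simp only [List.map_cons, List.map_nil, List.cons.injEq, and_true]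
          have hchk := pv_check_eq paths pre rest' p d hkeys hperm hpw
          rw [hchk]
          have : (pre ++ [p]).count p = 1 := by
            rw [List.count_append, List.count_singleton]
            have : pre.count p = 0 := List.count_eq_zero.mpr hp
            simp [this]
          simp [pvVerd, this]
    have hrec := ih (pre ++ [p]) _ (by rwa [← hassoc]) (by rwa [← hassoc]) hstep
    rw [hrec, ← hassoc]

-- ===== VERDICT (by name: the statement is the Claim_ definition above) =====
theorem remove_children_py_spec : Claim_equal_remove_children_py := by
  unfold Claim_equal_remove_children_py
  intro paths _hd
  unfold Spec_remove_children_py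
  simp only [remove_children_py, remove_children_py_alt]
  have hperm : (PySem.List.sorted paths (fun s => PySem.Str.len s)).Perm paths :=
    PySem.List.sorted_perm paths (fun s => PySem.Str.len s) false
  have hpw : (PySem.List.sorted paths (fun s => PySem.Str.len s)).Pairwise
      (fun a b => a.toList.length ≤ b.toList.length) := by
    have := PySem.List.sorted_pairwise paths (fun s => PySem.Str.len s)
    refine this.imp ?_
    intro a b h
    simp only [PySem.Str.len_eq] at h
    exact_mod_cast h
  have hB := pv_seen_fold paths (PySem.List.sorted paths (fun s => PySem.Str.len s)) []
    PySem.Dict.empty (by simpa using hperm) (by simpa using hpw) (by rfl)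
  simp only [List.nil_append] at hB
  rw [hB, List.filter_map, List.map_map]
  have hfc : ((fun pk : String × Bool => pk.2) ∘ fun x => (x, pvVerd paths
      (PySem.List.sorted paths (fun s => PySem.Str.len s)) x))
      = pvVerd paths (PySem.List.sorted paths (fun s => PySem.Str.len s)) := rfl
  have hfst : ((fun pk : String × Bool => pk.1) ∘ fun x => (x, pvVerd paths
      (PySem.List.sorted paths (fun s => PySem.Str.len s)) x)) = id := rfl
  rw [hfc, hfst, List.map_id]
  have hnd : (List.filter (pvVerd paths (PySem.List.sorted paths (fun s => PySem.Str.len s)))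
      (PySem.Set.ofList (PySem.List.sorted paths (fun s => PySem.Str.len s)))).Nodup :=
    (PySem.Set.nodup_ofList _).filter _
  rw [PySem.Set.ofList_eq_self_of_nodup _ hnd]
  have hdiff : ∀ (s t : PySem.Set String), PySem.Set.diff s t = s.filter (fun y => !PySem.Set.contains t y) :=
    fun s t => rfl
  rw [hdiff]
  apply List.filter_congr
  intro y hy
  have hyL : y ∈ PySem.List.sorted paths (fun s => PySem.Str.len s) := (PySem.Set.mem_ofList _ _).mp hy
  have hyp : y ∈ paths := hperm.mem_iff.mp hyL
  rw [Bool.eq_iff_iff]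
  have hbool : ∀ b : Bool, ((!b) = true ↔ ¬ b = true) := by decide
  rw [hbool, PySem.Set.contains_iff]
  have hmono : ∀ (p q : Nat) (a b : String), p ≤ q →
      (PySem.List.sorted paths (fun s => PySem.Str.len s))[p]? = some a →
      (PySem.List.sorted paths (fun s => PySem.Str.len s))[q]? = some b →
      a.toList.length ≤ b.toList.length := by
    intro p q a b hpq hpa hqb
    have hqlt : q < (PySem.List.sorted paths (fun s => PySem.Str.len s)).length :=
      (List.getElem?_eq_some_iff.mp hqb).1
    have hmon := PySem.List.key_sorted_getElem_mono paths (fun s => PySem.Str.len s) hpq hqlt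
    have hea : (PySem.List.sorted paths (fun s => PySem.Str.len s))[p] = a :=
      (List.getElem?_eq_some_iff.mp hpa).2
    have heb : (PySem.List.sorted paths (fun s => PySem.Str.len s))[q] = b :=
      (List.getElem?_eq_some_iff.mp hqb).2
    rw [hea, heb] at hmon
    simp only [PySem.Str.len_eq] at hmon
    exact_mod_cast hmon
  rw [pv_subdirs_iff y _ hmono hyL]
  have hcnt : 0 < (PySem.List.sorted paths (fun s => PySem.Str.len s)).count y :=
    List.count_pos_iff.mpr hyL
  have hexn : (∃ q ∈ PySem.List.sorted paths (fun s => PySem.Str.len s), q ≠ y ∧ q.toList <+: y.toList)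
      ↔ (∃ q ∈ paths, q ≠ y ∧ q.toList <+: y.toList) := by
    constructor
    · rintro ⟨q, h1, h2, h3⟩; exact ⟨q, hperm.mem_iff.mp h1, h2, h3⟩
    · rintro ⟨q, h1, h2, h3⟩; exact ⟨q, hperm.mem_iff.mpr h1, h2, h3⟩
  simp only [pvVerd, Bool.and_eq_true, decide_eq_true_eq, pvNoPre_iff, not_or]
  rw [hexn]
  constructor
  · rintro ⟨h1, h2⟩
    exact ⟨by omega, h2⟩
  · rintro ⟨h1, h2⟩
    exact ⟨by omega, h2⟩
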